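-- pv_equiv track=rewrite | github.com/roed314/FiniteGroups | Code/cloud_collect.py | class_to_int
-- ===== SOURCE A (Python) =====
-- import sys, os, re, string, time, itertools
--
-- def class_to_int(k):
--     if k.isdigit():
--         return int(k)
--     elif k.isalpha() and k.islower():
--         kk = [string.ascii_lowercase.index(ch) for ch in k]
--     elif k.isalpha() and k.isupper():
--         kk = [string.ascii_uppercase.index(ch) for ch in k]
--     else:
--         raise ValueError("Invalid class", k)
--     kk.reverse()
--     return sum(kk[i] * 26 ** i for i in range(len(kk)))
-- ===== SOURCE B (Python) =====
-- import string
--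
-- def class_to_int(k):
--     # Simpler: Horner left fold over the letters instead of building an
--     # index list, reversing it, and summing positional powers of 26.
--     if k.isdigit():
--         return int(k)
--     if k.isalpha() and k.islower():
--         alphabet = string.ascii_lowercase
--     elif k.isalpha() and k.isupper():
--         alphabet = string.ascii_uppercase
--     else:
--         raise ValueError("Invalid class", k)
--     acc = 0
--     for ch in k:
--         acc = acc * 26 + alphabet.index(ch)
--     return acc
-- ===== Notes on version B (the rewrite author's own statement) =====
-- stated objective: simpler
-- what changed: B replaces A's build-index-list / reverse / sum-of-kk[i]*26**i pipeline by a single left-to-right Horner fold acc = acc*26 + alphabet.index(ch), keeping the isdigit early return and the error dispatch.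
import Mathlib
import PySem

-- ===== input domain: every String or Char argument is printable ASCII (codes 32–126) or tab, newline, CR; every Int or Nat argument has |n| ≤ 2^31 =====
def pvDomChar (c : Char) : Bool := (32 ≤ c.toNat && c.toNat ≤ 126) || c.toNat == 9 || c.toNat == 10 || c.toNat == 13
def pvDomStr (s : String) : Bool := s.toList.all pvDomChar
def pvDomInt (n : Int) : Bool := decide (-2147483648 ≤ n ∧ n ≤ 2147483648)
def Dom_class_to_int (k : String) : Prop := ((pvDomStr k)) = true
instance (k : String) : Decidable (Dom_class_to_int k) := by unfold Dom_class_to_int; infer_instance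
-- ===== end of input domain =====

-- B replaces A's index-list / reverse / sum-of-powers pipeline by a single Horner fold; same dispatch.

-- Hand-ported helpers (PySem has no str.islower/str.isupper): Python's str.islower() =
-- at least one cased character and no uppercase cased character; exact on the ASCII domain,
-- where the cased characters are exactly a-z and A-Z.
def pyStrIslower (cs : List Char) : Bool :=
  cs.any PySem.Chars.islower && cs.all (fun c => !PySem.Chars.isupper c)
def pyStrIsupper (cs : List Char) : Bool :=
  cs.any PySem.Chars.isupper && cs.all (fun c => !PySem.Chars.islower c)

def asciiLowercase : List Char := "abcdefghijklmnopqrstuvwxyz".toList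
def asciiUppercase : List Char := "ABCDEFGHIJKLMNOPQRSTUVWXYZ".toList

-- ===== PORT A =====
-- A's final line: sum(kk[i] * 26 ** i for i in range(len(kk)))
def pySumPow (kk : List Int) : Int :=
  ((List.range kk.length).map (fun i => kk.getD i 0 * 26 ^ i)).sum

def class_to_int (k : String) : Int :=
  if PySem.Str.strIsdigit k then
    (PySem.Int.ofStr? k).getD 0  -- int(k); never none when k.isdigit() on ASCII
  else
    pySumPow
      ((if PySem.Str.strIsalpha k && pyStrIslower k.toList then
          k.toList.map (fun ch => (((PySem.List.index? asciiLowercase ch).getD 0 : Nat) : Int))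
        else if PySem.Str.strIsalpha k && pyStrIsupper k.toList then
          k.toList.map (fun ch => (((PySem.List.index? asciiUppercase ch).getD 0 : Nat) : Int))
        else
          []  -- raise ValueError("Invalid class", k): excluded by Pre_
       ).reverse)  -- kk.reverse()

-- ===== PORT B =====
-- B's loop: acc = 0; for ch in k: acc = acc * 26 + alphabet.index(ch)
def hornerFold (alphabet : List Char) (cs : List Char) : Int :=
  cs.foldl (fun acc ch => acc * 26 + (((PySem.List.index? alphabet ch).getD 0 : Nat) : Int)) 0

def class_to_int_alt (k : String) : Int :=
  if PySem.Str.strIsdigit k then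
    (PySem.Int.ofStr? k).getD 0  -- int(k); never none when k.isdigit() on ASCII
  else
    hornerFold
      (if PySem.Str.strIsalpha k && pyStrIslower k.toList then asciiLowercase
       else if PySem.Str.strIsalpha k && pyStrIsupper k.toList then asciiUppercase
       else [])  -- raise ValueError("Invalid class", k): excluded by Pre_
      k.toList

-- ===== PRECONDITION & SPEC =====
-- Pre_ excludes exactly the inputs on which A raises ValueError("Invalid class", k).
def Pre_class_to_int (k : String) : Prop :=
  PySem.Str.strIsdigit k = true ∨
    (PySem.Str.strIsalpha k = true ∧
      (pyStrIslower k.toList = true ∨ pyStrIsupper k.toList = true))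
instance (k : String) : Decidable (Pre_class_to_int k) := by unfold Pre_class_to_int; infer_instance
def pvWitness_class_to_int : String := "ab"

def Spec_class_to_int (k : String) (out : Int) : Prop := out = class_to_int_alt k
instance (k : String) (out : Int) : Decidable (Spec_class_to_int k out) := by unfold Spec_class_to_int; infer_instance

-- ===== CLAIM (what is proved, stated in full; the proofs are below) =====
def Claim_equal_class_to_int : Prop := ∀ (k : String), Dom_class_to_int k → Pre_class_to_int k → Spec_class_to_int k (class_to_int k)

-- ===== LEMMAS AND PROOFS =====

theorem pySumPow_append (l : List Int) (d : Int) :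
    pySumPow (l ++ [d]) = pySumPow l + d * 26 ^ l.length := by
  unfold pySumPow
  simp only [List.length_append, List.length_cons, List.length_nil, List.range_succ,
    List.map_append, List.sum_append, List.map_cons, List.map_nil, List.sum_cons,
    List.sum_nil, add_zero, zero_add]
  congr 1
  · apply congrArg
    apply List.map_congr_left
    intro i hi
    rw [List.mem_range] at hi
    rw [List.getD_eq_getElem?_getD, List.getD_eq_getElem?_getD,
        List.getElem?_append_left hi]
  · rw [List.getD_eq_getElem?_getD, List.getElem?_concat_length]
    simp

theorem horner_sum (f : Char → Int) (cs : List Char) (acc : Int) :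
    cs.foldl (fun a ch => a * 26 + f ch) acc
      = acc * 26 ^ cs.length + pySumPow (cs.map f).reverse := by
  induction cs generalizing acc with
  | nil => simp [pySumPow]
  | cons c t ih =>
    rw [List.foldl_cons, ih, List.map_cons, List.reverse_cons, pySumPow_append]
    simp only [List.length_reverse, List.length_map, List.length_cons, pow_succ]
    ring

theorem branch_eq (alphabet : List Char) (cs : List Char) :
    pySumPow ((cs.map (fun ch => (((PySem.List.index? alphabet ch).getD 0 : Nat) : Int))).reverse)
      = hornerFold alphabet cs := by
  unfold hornerFold
  rw [horner_sum (fun ch => (((PySem.List.index? alphabet ch).getD 0 : Nat) : Int)) cs 0]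
  simp

-- ===== VERDICT (by name: the statement is the Claim_ definition above) =====
theorem class_to_int_spec : Claim_equal_class_to_int := by
  intro k _ hpre
  unfold Spec_class_to_int class_to_int class_to_int_alt
  by_cases hd : PySem.Str.strIsdigit k = true
  · rw [if_pos hd, if_pos hd]
  · rw [if_neg hd, if_neg hd]
    by_cases hl : (PySem.Str.strIsalpha k && pyStrIslower k.toList) = true
    · rw [if_pos hl, if_pos hl]
      exact branch_eq asciiLowercase k.toList
    · rw [if_neg hl, if_neg hl]
      by_cases hu : (PySem.Str.strIsalpha k && pyStrIsupper k.toList) = true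
      · rw [if_pos hu, if_pos hu]
        exact branch_eq asciiUppercase k.toList
      · exfalso
        unfold Pre_class_to_int at hpre
        rcases hpre with h | ⟨ha, h | h⟩
        · exact hd h
        · exact hl (by rw [Bool.and_eq_true]; exact ⟨ha, h⟩)
        · exact hu (by rw [Bool.and_eq_true]; exact ⟨ha, h⟩)
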